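-- pv_equiv track=rewrite | github.com/Sukesh07/AlgoViz | AlgoViz-main/algorithms.py | quick_get_colors
-- ===== SOURCE A (Python) =====
-- def quick_get_colors(size, head, tail, border, curr_idx, bar_color, is_swap=False):
--     colors = []
--     for i in range(size):
--         if i >= head and i <= tail:
--             colors.append(bar_color)
--         else:
--             colors.append(bar_color)
--
--         if i == tail:
--             colors[i] = '#93dbca'
--         elif i == border:
--             colors[i] = '#286eb5'
--         elif i == curr_idx:
--             colors[i] = '#d5e68a'
--
--         if is_swap:
--             if i == border or i == curr_idx:
--                 colors[i] = '#fcba03'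
--     return colors
-- ===== SOURCE B (Python) =====
-- def quick_get_colors(size, head, tail, border, curr_idx, bar_color, is_swap=False):
--     colors = [bar_color] * size
--     for idx, c in ((curr_idx, '#d5e68a'), (border, '#286eb5'), (tail, '#93dbca')):
--         if 0 <= idx < size:
--             colors[idx] = c
--     if is_swap:
--         for idx in (border, curr_idx):
--             if 0 <= idx < size:
--                 colors[idx] = '#fcba03'
--     return colors
-- ===== Notes on version B (the rewrite author's own statement) =====
-- stated objective: simpler
-- what changed: Instead of scanning every index and testing it against tail/border/curr_idx, B builds the whole list with [bar_color]*size and writes only the (at most five) special cells directly by index, in reverse-priority order with range guards.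
import Mathlib
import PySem

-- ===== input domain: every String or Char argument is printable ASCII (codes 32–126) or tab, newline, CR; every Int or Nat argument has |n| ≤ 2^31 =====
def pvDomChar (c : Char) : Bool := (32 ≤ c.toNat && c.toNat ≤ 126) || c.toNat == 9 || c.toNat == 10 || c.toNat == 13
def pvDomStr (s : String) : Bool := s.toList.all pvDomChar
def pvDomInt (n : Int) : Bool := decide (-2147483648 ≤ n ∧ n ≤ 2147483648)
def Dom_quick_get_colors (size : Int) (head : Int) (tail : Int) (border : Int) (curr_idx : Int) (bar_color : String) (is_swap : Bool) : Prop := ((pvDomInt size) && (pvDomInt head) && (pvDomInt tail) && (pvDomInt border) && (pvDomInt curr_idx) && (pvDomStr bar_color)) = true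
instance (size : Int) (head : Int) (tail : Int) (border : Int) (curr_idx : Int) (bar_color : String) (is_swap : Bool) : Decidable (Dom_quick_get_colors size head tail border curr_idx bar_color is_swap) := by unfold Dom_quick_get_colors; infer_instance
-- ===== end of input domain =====

-- B builds the list with replicate and writes only the special cells by index (range-guarded),
-- in reverse-priority order, instead of scanning and branching on every index. Objective: simpler.

-- ===== PORT A =====
def quick_get_colors (size : Int) (head : Int) (tail : Int) (border : Int) (curr_idx : Int) (bar_color : String) (is_swap : Bool) : List String :=
  (PySem.List.pyRange 0 size 1).foldl
    (fun colors i =>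
      -- both branches of A's 'if i >= head and i <= tail' append bar_color
      let colors := if i ≥ head ∧ i ≤ tail then colors ++ [bar_color] else colors ++ [bar_color]
      let colors :=
        if i = tail then colors.set i.toNat "#93dbca"
        else if i = border then colors.set i.toNat "#286eb5"
        else if i = curr_idx then colors.set i.toNat "#d5e68a"
        else colors
      if is_swap then
        if i = border ∨ i = curr_idx then colors.set i.toNat "#fcba03" else colors
      else colors)
    []

-- ===== PORT B =====
def pvSetGuard (size : Int) (cs : List String) (p : Int × String) : List String :=
  if 0 ≤ p.1 ∧ p.1 < size then cs.set p.1.toNat p.2 else cs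

def quick_get_colors_alt (size : Int) (head : Int) (tail : Int) (border : Int) (curr_idx : Int) (bar_color : String) (is_swap : Bool) : List String :=
  let colors := List.replicate size.toNat bar_color
  let colors := [(curr_idx, "#d5e68a"), (border, "#286eb5"), (tail, "#93dbca")].foldl (pvSetGuard size) colors
  if is_swap then
    [border, curr_idx].foldl (fun cs idx => pvSetGuard size cs (idx, "#fcba03")) colors
  else colors

-- ===== PRECONDITION & SPEC =====
def Spec_quick_get_colors (size : Int) (head : Int) (tail : Int) (border : Int) (curr_idx : Int) (bar_color : String) (is_swap : Bool) (out : List String) : Prop := out = quick_get_colors_alt size head tail border curr_idx bar_color is_swap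
instance (size : Int) (head : Int) (tail : Int) (border : Int) (curr_idx : Int) (bar_color : String) (is_swap : Bool) (out : List String) : Decidable (Spec_quick_get_colors size head tail border curr_idx bar_color is_swap out) := by unfold Spec_quick_get_colors; infer_instance

-- ===== CLAIM (what is proved, stated in full; the proofs are below) =====
def Claim_equal_quick_get_colors : Prop := ∀ (size : Int) (head : Int) (tail : Int) (border : Int) (curr_idx : Int) (bar_color : String) (is_swap : Bool), Dom_quick_get_colors size head tail border curr_idx bar_color is_swap → Spec_quick_get_colors size head tail border curr_idx bar_color is_swap (quick_get_colors size head tail border curr_idx bar_color is_swap)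

-- ===== LEMMAS AND PROOFS =====

-- the per-index final color both programs agree on
def pvColorAt (tail border curr_idx : Int) (bar_color : String) (is_swap : Bool) (i : Int) : String :=
  if is_swap ∧ (i = border ∨ i = curr_idx) then "#fcba03"
  else if i = tail then "#93dbca"
  else if i = border then "#286eb5"
  else if i = curr_idx then "#d5e68a"
  else bar_color

theorem set_append_last {α : Type} (l : List α) (a b : α) :
    (l ++ [a]).set l.length b = l ++ [b] := by
  induction l with
  | nil => rfl
  | cons x xs ih => simp [List.set, ih]

-- A's loop appends pvColorAt i at each step
theorem stepA_eq (head tail border curr_idx : Int) (bar_color : String) (is_swap : Bool)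
    (colors : List String) (i : Int) (hi : 0 ≤ i) (hlen : colors.length = i.toNat) :
    (let colors := if i ≥ head ∧ i ≤ tail then colors ++ [bar_color] else colors ++ [bar_color]
     let colors :=
       if i = tail then colors.set i.toNat "#93dbca"
       else if i = border then colors.set i.toNat "#286eb5"
       else if i = curr_idx then colors.set i.toNat "#d5e68a"
       else colors
     if is_swap then
       if i = border ∨ i = curr_idx then colors.set i.toNat "#fcba03" else colors
     else colors)
    = colors ++ [pvColorAt tail border curr_idx bar_color is_swap i] := by
  have h1 : (if i ≥ head ∧ i ≤ tail then colors ++ [bar_color] else colors ++ [bar_color]) = colors ++ [bar_color] := by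
    split <;> rfl
  have hset : ∀ (x c : String), (colors ++ [x]).set i.toNat c = colors ++ [c] := by
    intro x c; rw [← hlen]; exact set_append_last _ _ _
  simp only [pvColorAt, h1]
  split_ifs <;> simp_all [hset]

theorem foldA_eq (head tail border curr_idx : Int) (bar_color : String) (is_swap : Bool)
    (a b : Int) (ha : 0 ≤ a) (hab : a ≤ b) (colors : List String) (hlen : colors.length = a.toNat) :
    (PySem.List.pyRange a b 1).foldl
      (fun colors i =>
        let colors := if i ≥ head ∧ i ≤ tail then colors ++ [bar_color] else colors ++ [bar_color]
        let colors :=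
          if i = tail then colors.set i.toNat "#93dbca"
          else if i = border then colors.set i.toNat "#286eb5"
          else if i = curr_idx then colors.set i.toNat "#d5e68a"
          else colors
        if is_swap then
          if i = border ∨ i = curr_idx then colors.set i.toNat "#fcba03" else colors
        else colors)
      colors
    = colors ++ (PySem.List.pyRange a b 1).map (pvColorAt tail border curr_idx bar_color is_swap) := by
  by_cases h : b ≤ a
  · rw [PySem.List.pyRange_one_eq_nil h]; simp
  · push_neg at h
    have hn : (b - a).toNat ≠ 0 := by omega
    rw [PySem.List.pyRange_one_cons h]
    simp only [List.foldl_cons, List.map_cons]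
    rw [stepA_eq head tail border curr_idx bar_color is_swap colors a ha hlen]
    rw [foldA_eq head tail border curr_idx bar_color is_swap (a+1) b (by omega) (by omega)
      (colors ++ [pvColorAt tail border curr_idx bar_color is_swap a])
      (by simp [hlen]; omega)]
    simp
termination_by (b - a).toNat
decreasing_by omega

theorem A_char (size head tail border curr_idx : Int) (bar_color : String) (is_swap : Bool) :
    quick_get_colors size head tail border curr_idx bar_color is_swap
    = (PySem.List.pyRange 0 size 1).map (pvColorAt tail border curr_idx bar_color is_swap) := by
  unfold quick_get_colors
  by_cases h : size ≤ 0
  · rw [PySem.List.pyRange_one_eq_nil h]; rfl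
  · have := foldA_eq head tail border curr_idx bar_color is_swap 0 size (le_refl 0) (by omega) [] rfl
    simpa using this

theorem length_pvSetGuard (size : Int) (cs : List String) (p : Int × String) :
    (pvSetGuard size cs p).length = cs.length := by
  unfold pvSetGuard; split <;> simp

theorem getElem_pvSetGuard (size : Int) (cs : List String) (p : Int × String)
    (k : Nat) (hk : k < cs.length) (hcs : (cs.length : Int) = size) :
    (pvSetGuard size cs p)[k]'(by rw [length_pvSetGuard]; exact hk)
    = if (k : Int) = p.1 then p.2 else cs[k] := by
  unfold pvSetGuard
  split
  · rename_i hp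
    rw [List.getElem_set]
    have : p.1.toNat = k ↔ (k : Int) = p.1 := by omega
    by_cases he : (k : Int) = p.1 <;> simp [he, this]
  · rename_i hp
    have : ¬ (k : Int) = p.1 := by
      intro he; apply hp; constructor <;> omega
    simp [this]

theorem B_char (size head tail border curr_idx : Int) (bar_color : String) (is_swap : Bool) :
    quick_get_colors_alt size head tail border curr_idx bar_color is_swap
    = (PySem.List.pyRange 0 size 1).map (pvColorAt tail border curr_idx bar_color is_swap) := by
  unfold quick_get_colors_alt
  simp only [List.foldl_cons, List.foldl_nil]
  apply List.ext_getElem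
  · by_cases hsw : is_swap <;>
      simp [hsw, length_pvSetGuard, PySem.List.length_pyRange_one]
  · intro k h1 h2
    have hk : k < size.toNat := by
      simpa [PySem.List.length_pyRange_one] using h2
    have hsize : (0:Int) < size := by omega
    have hkint : (k : Int) < size := by omega
    simp only [List.getElem_map, PySem.List.getElem_pyRange_one, zero_add]
    have hlen0 : ((List.replicate size.toNat bar_color).length : Int) = size := by
      simp; omega
    have hk0 : k < (List.replicate size.toNat bar_color).length := by simp [hk]
    have e1 := getElem_pvSetGuard size (List.replicate size.toNat bar_color) (curr_idx, "#d5e68a") k hk0 hlen0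
    have e2 := getElem_pvSetGuard size (pvSetGuard size (List.replicate size.toNat bar_color) (curr_idx, "#d5e68a")) (border, "#286eb5") k (by simp only [length_pvSetGuard]; exact hk0) (by simp only [length_pvSetGuard]; exact hlen0)
    have e3 := getElem_pvSetGuard size (pvSetGuard size (pvSetGuard size (List.replicate size.toNat bar_color) (curr_idx, "#d5e68a")) (border, "#286eb5")) (tail, "#93dbca") k (by simp only [length_pvSetGuard]; exact hk0) (by simp only [length_pvSetGuard]; exact hlen0)
    by_cases hsw : is_swap
    · simp only [hsw, eq_self_iff_true, if_true]
      have e4 := getElem_pvSetGuard size (pvSetGuard size (pvSetGuard size (pvSetGuard size (List.replicate size.toNat bar_color) (curr_idx, "#d5e68a")) (border, "#286eb5")) (tail, "#93dbca")) (border, "#fcba03") k (by simp only [length_pvSetGuard]; exact hk0) (by simp only [length_pvSetGuard]; exact hlen0)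
      have e5 := getElem_pvSetGuard size (pvSetGuard size (pvSetGuard size (pvSetGuard size (pvSetGuard size (List.replicate size.toNat bar_color) (curr_idx, "#d5e68a")) (border, "#286eb5")) (tail, "#93dbca")) (border, "#fcba03")) (curr_idx, "#fcba03") k (by simp only [length_pvSetGuard]; exact hk0) (by simp only [length_pvSetGuard]; exact hlen0)
      rw [e5, e4, e3, e2, e1]
      unfold pvColorAt
      by_cases hb : (k:Int) = border <;> by_cases hc : (k:Int) = curr_idx <;>
        by_cases ht : (k:Int) = tail <;>
        simp [hsw, hb, hc, ht, List.getElem_replicate] <;> split_ifs <;> simp_all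
    · simp only [Bool.not_eq_true] at hsw
      simp only [hsw, Bool.false_eq_true, if_false]
      rw [e3, e2, e1]
      unfold pvColorAt
      by_cases hb : (k:Int) = border <;> by_cases hc : (k:Int) = curr_idx <;>
        by_cases ht : (k:Int) = tail <;>
        simp [hsw, hb, hc, ht, List.getElem_replicate] <;> split_ifs <;> simp_all

-- ===== VERDICT (by name: the statement is the Claim_ definition above) =====
theorem quick_get_colors_spec : Claim_equal_quick_get_colors := by
  intro size head tail border curr_idx bar_color is_swap _
  unfold Spec_quick_get_colors
  rw [A_char, B_char]
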